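-- pv_equiv track=rewrite | github.com/bigtongue5566/merlinai-proxy | merlin_proxy/openai_adapter.py | extract_last_json_object
-- ===== SOURCE A (Python) =====
-- from typing import Any, Dict, List, Optional, Union
--
-- def extract_last_json_object(raw_text: str) -> Optional[str]:
--     in_string = False
--     escape = False
--     depth = 0
--     start_index: Optional[int] = None
--     completed_objects: List[str] = []
--
--     for index, char in enumerate(raw_text):
--         if escape:
--             escape = False
--             continue
--
--         if char == "\\" and in_string:
--             escape = True
--             continue
--
--         if char == '"':
--             in_string = not in_string
--             continue
--
--         if in_string:
--             continue
--
--         if char == "{":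
--             if depth == 0:
--                 start_index = index
--             depth += 1
--             continue
--
--         if char == "}" and depth > 0:
--             depth -= 1
--             if depth == 0 and start_index is not None:
--                 completed_objects.append(raw_text[start_index : index + 1])
--                 start_index = None
--
--     return completed_objects[-1] if completed_objects else None
-- ===== SOURCE B (Python) =====
-- def extract_last_json_object(raw_text):
--     # Pass 1: mask out string literals (same length; quotes, escapes and
--     # string contents become ' '), replaying the quote/escape state machine.
--     masked = []
--     in_string = False
--     escape = False
--     for ch in raw_text:
--         if escape:
--             masked.append(' ')
--             escape = False
--         elif in_string and ch == '\\':
--             masked.append(' ')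
--             escape = True
--         elif ch == '"':
--             masked.append(' ')
--             in_string = not in_string
--         elif in_string:
--             masked.append(' ')
--         else:
--             masked.append(ch)
--     # Pass 2: pure brace matching on the masked text, slicing the original.
--     depth = 0
--     start = 0
--     last = None
--     for index, ch in enumerate(masked):
--         if ch == '{':
--             if depth == 0:
--                 start = index
--             depth += 1
--         elif ch == '}' and depth > 0:
--             depth -= 1
--             if depth == 0:
--                 last = raw_text[start:index + 1]
--     return last
-- ===== Notes on version B (the rewrite author's own statement) =====
-- stated objective: alternative
-- what changed: Splits A's single interleaved scanner into two passes: a masking pass that blanks out string literals (replaying the quote/escape machine), then a pure brace-matching pass over the masked text that keeps only the last completed object instead of accumulating a list.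
import Mathlib
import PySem

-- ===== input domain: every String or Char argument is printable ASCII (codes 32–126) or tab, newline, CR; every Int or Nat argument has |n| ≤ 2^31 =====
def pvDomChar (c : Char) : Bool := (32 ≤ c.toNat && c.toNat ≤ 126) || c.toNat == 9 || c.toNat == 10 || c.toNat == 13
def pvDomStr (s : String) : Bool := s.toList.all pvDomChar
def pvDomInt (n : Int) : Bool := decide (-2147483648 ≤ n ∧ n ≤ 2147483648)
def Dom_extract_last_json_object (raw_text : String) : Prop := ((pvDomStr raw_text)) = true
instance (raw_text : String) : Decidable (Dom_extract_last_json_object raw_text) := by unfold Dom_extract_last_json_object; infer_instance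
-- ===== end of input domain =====

-- B replays A's quote/escape machine in a separate masking pass, then brace-matches the
-- masked text in a second pass keeping only the last completed object (alternative decomposition).


-- ===== PORT A =====
-- A's single scan: one loop carrying in_string/escape/depth/start_index and the list of
-- completed objects, index counter transliterates `enumerate`.
def pvLoopA (raw : String) : List Char → Int → Bool → Bool → Int → Option Int → List String → List String
  | [], _, _, _, _, _, acc => acc
  | c :: rest, i, in_string, escape, depth, start_index, acc =>
    if escape then pvLoopA raw rest (i + 1) in_string false depth start_index acc
    else if c = '\\' ∧ in_string then pvLoopA raw rest (i + 1) in_string true depth start_index acc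
    else if c = '"' then pvLoopA raw rest (i + 1) (!in_string) escape depth start_index acc
    else if in_string then pvLoopA raw rest (i + 1) in_string escape depth start_index acc
    else if c = '{' then
      pvLoopA raw rest (i + 1) in_string escape (depth + 1)
        (if depth = 0 then some i else start_index) acc
    else if c = '}' ∧ depth > 0 then
      if depth - 1 = 0 then
        match start_index with
        | some s =>
          pvLoopA raw rest (i + 1) in_string escape (depth - 1) none
            (acc ++ [PySem.Str.slice raw (some s) (some (i + 1))])
        | none => pvLoopA raw rest (i + 1) in_string escape (depth - 1) start_index acc
      else pvLoopA raw rest (i + 1) in_string escape (depth - 1) start_index acc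
    else pvLoopA raw rest (i + 1) in_string escape depth start_index acc

def extract_last_json_object (raw_text : String) : Option String :=
  let completed_objects := pvLoopA raw_text raw_text.toList 0 false false 0 none []
  -- `completed_objects[-1] if completed_objects else None`
  if completed_objects = [] then none else completed_objects.getLast?

-- ===== PORT B =====
-- Pass 1: mask string literals (quotes, escapes and contents become ' '), same length.
def pvMaskB : List Char → Bool → Bool → List Char
  | [], _, _ => []
  | c :: rest, in_string, escape =>
    if escape then ' ' :: pvMaskB rest in_string false
    else if in_string ∧ c = '\\' then ' ' :: pvMaskB rest in_string true
    else if c = '"' then ' ' :: pvMaskB rest (!in_string) escape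
    else if in_string then ' ' :: pvMaskB rest in_string escape
    else c :: pvMaskB rest in_string escape

-- Pass 2: pure brace matching on the masked text, slicing the original string.
def pvLoopB (raw : String) : List Char → Int → Int → Int → Option String → Option String
  | [], _, _, _, last => last
  | c :: rest, i, depth, start, last =>
    if c = '{' then
      pvLoopB raw rest (i + 1) (depth + 1) (if depth = 0 then i else start) last
    else if c = '}' ∧ depth > 0 then
      pvLoopB raw rest (i + 1) (depth - 1) start
        (if depth - 1 = 0 then some (PySem.Str.slice raw (some start) (some (i + 1))) else last)
    else pvLoopB raw rest (i + 1) depth start last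

def extract_last_json_object_alt (raw_text : String) : Option String :=
  pvLoopB raw_text (pvMaskB raw_text.toList false false) 0 0 0 none

-- ===== PRECONDITION & SPEC =====
def Spec_extract_last_json_object (raw_text : String) (out : Option String) : Prop := out = extract_last_json_object_alt raw_text
instance (raw_text : String) (out : Option String) : Decidable (Spec_extract_last_json_object raw_text out) := by unfold Spec_extract_last_json_object; infer_instance

-- ===== CLAIM (what is proved, stated in full; the proofs are below) =====
def Claim_equal_extract_last_json_object : Prop := ∀ (raw_text : String), Dom_extract_last_json_object raw_text → Spec_extract_last_json_object raw_text (extract_last_json_object raw_text)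

-- ===== LEMMAS AND PROOFS =====

-- State correspondence: A's start_index is `none` exactly at depth 0 and `some sB` (B's start)
-- at positive depth; B's `last` is the last element of A's accumulator.
theorem pvMainInv (raw : String) :
    ∀ (cs : List Char) (i : Int) (in_string escape : Bool) (depth sB : Int) (acc : List String),
    0 ≤ depth →
    (pvLoopA raw cs i in_string escape depth (if depth = 0 then none else some sB) acc).getLast?
      = pvLoopB raw (pvMaskB cs in_string escape) i depth sB acc.getLast? := by
  intro cs
  induction cs with
  | nil => intro i instr esc depth sB acc _; simp [pvLoopA, pvMaskB, pvLoopB]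
  | cons c rest ih =>
    intro i instr esc depth sB acc hd
    by_cases hesc : esc = true
    · subst hesc
      simpa [pvLoopA, pvMaskB, pvLoopB] using ih (i+1) instr false depth sB acc hd
    · replace hesc : esc = false := by simpa using hesc
      subst hesc
      by_cases hbs : c = '\\' ∧ instr = true
      · simp only [pvLoopA, pvMaskB, pvLoopB,
          if_neg (by simp : ¬ (false = true)), if_pos hbs,
          if_pos (show instr = true ∧ c = '\\' from ⟨hbs.2, hbs.1⟩)]
        simpa [pvLoopB] using ih (i+1) instr true depth sB acc hd
      · by_cases hq : c = '"'
        · have hni : ¬ (instr = true ∧ c = '\\') := fun h => hbs ⟨h.2, h.1⟩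
          simp only [pvLoopA, pvMaskB, pvLoopB,
            if_neg (by simp : ¬ (false = true)), if_neg hbs, if_neg hni, if_pos hq]
          simpa [pvLoopB] using ih (i+1) (!instr) false depth sB acc hd
        · by_cases hin : instr = true
          · have hni : ¬ (instr = true ∧ c = '\\') := fun h => hbs ⟨h.2, h.1⟩
            simp only [pvLoopA, pvMaskB, pvLoopB,
              if_neg (by simp : ¬ (false = true)), if_neg hbs, if_neg hni, if_neg hq, if_pos hin]
            simpa [pvLoopB] using ih (i+1) instr false depth sB acc hd
          · replace hin : instr = false := by simpa using hin
            subst hin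
            have hni : ¬ (false = true ∧ c = '\\') := by simp
            by_cases hob : c = '{'
            · simp only [pvLoopA, pvMaskB,
                if_neg (by simp : ¬ (false = true)), if_neg hbs, if_neg hni, if_neg hq,
                if_pos hob]
              by_cases h0 : depth = 0
              · subst h0
                have := ih (i+1) false false 1 i acc (by omega)
                simpa [pvLoopB, hob, if_neg (show ¬ (1:Int) = 0 by omega)] using this
              · have := ih (i+1) false false (depth+1) sB acc (by omega)
                simp only [if_neg h0] at *
                simpa [pvLoopB, hob, if_neg (show ¬ depth + 1 = 0 by omega), if_neg h0] using this
            · by_cases hcb : c = '}' ∧ depth > 0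
              · have h0 : ¬ depth = 0 := by omega
                simp only [pvLoopA, pvMaskB, pvLoopB,
                  if_neg (by simp : ¬ (false = true)), if_neg hbs, if_neg hni, if_neg hq,
                  if_neg hob, if_pos hcb, if_neg h0]
                by_cases h1 : depth - 1 = 0
                · have := ih (i+1) false false (depth-1) sB
                    (acc ++ [PySem.Str.slice raw (some sB) (some (i + 1))]) (by omega)
                  simp only [h1] at this ⊢
                  simpa [List.getLast?_concat] using this
                · have := ih (i+1) false false (depth-1) sB acc (by omega)
                  simpa [if_neg h1] using this
              · simp only [pvLoopA, pvMaskB, pvLoopB,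
                  if_neg (by simp : ¬ (false = true)), if_neg hbs, if_neg hni, if_neg hq,
                  if_neg hob, if_neg hcb]
                exact ih (i+1) false false depth sB acc hd

-- ===== VERDICT (by name: the statement is the Claim_ definition above) =====
theorem extract_last_json_object_spec : Claim_equal_extract_last_json_object := by
  intro raw _
  unfold Spec_extract_last_json_object extract_last_json_object extract_last_json_object_alt
  have h := pvMainInv raw raw.toList 0 false false 0 0 [] (le_refl 0)
  norm_num at h
  by_cases he : pvLoopA raw raw.toList 0 false false 0 none [] = []
  · rw [if_pos he]
    rw [he] at h
    simpa using h
  · rw [if_neg he]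
    exact h
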